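-- pv_equiv track=rewrite | github.com/Shrutilap/domino-challenge | simulator.py | query_last_ticks
-- ===== SOURCE A (Python) =====
-- def query_last_ticks(log_lines, N):
--     lines = []
--     count = 0
--     for line in reversed(log_lines):
--         if line.startswith('--- Tick'):
--             count += 1
--             if count > N:
--                 break
--         lines.insert(0, line)
--     return "\n".join(lines)
-- ===== SOURCE B (Python) =====
-- def query_last_ticks(log_lines, N):
--     tick_indices = [i for i, line in enumerate(log_lines) if line.startswith('--- Tick')]
--     m = len(tick_indices)
--     k = max(N, 0)
--     start = tick_indices[m - 1 - k] + 1 if m > k else 0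
--     return "\n".join(log_lines[start:])
-- ===== Notes on version B (the rewrite author's own statement) =====
-- stated objective: faster
-- what changed: Replaced A's reverse scan that accumulates with quadratic lines.insert(0, line) and a break by a forward pass collecting tick-line indices and one tail slice from a single clamped index.
import Mathlib
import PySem

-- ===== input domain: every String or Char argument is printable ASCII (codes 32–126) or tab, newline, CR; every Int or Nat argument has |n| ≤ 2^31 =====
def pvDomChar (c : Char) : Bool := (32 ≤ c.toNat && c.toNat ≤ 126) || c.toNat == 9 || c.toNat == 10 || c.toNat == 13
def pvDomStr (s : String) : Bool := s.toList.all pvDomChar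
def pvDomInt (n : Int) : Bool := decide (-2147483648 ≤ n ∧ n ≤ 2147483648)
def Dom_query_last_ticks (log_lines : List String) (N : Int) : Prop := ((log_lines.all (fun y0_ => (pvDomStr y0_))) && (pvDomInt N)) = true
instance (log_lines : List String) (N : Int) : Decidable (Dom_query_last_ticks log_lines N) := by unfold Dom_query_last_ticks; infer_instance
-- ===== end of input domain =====

-- B replaces A's reverse scan (which accumulates via quadratic lines.insert(0, line) and a break)
-- by a forward pass collecting tick-line indices and one tail slice; objective: faster (measured).

-- ===== PORT A =====
def pvTick (l : String) : Bool := PySem.Str.startswith l "--- Tick"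

-- loop 'for line in reversed(log_lines)' with break; acc is 'lines' (insert(0, line) prepends)
def pvGoA (N : Int) : List String → Int → List String → List String
  | [], _, acc => acc
  | l :: rest, count, acc =>
    if pvTick l then
      if count + 1 > N then acc
      else pvGoA N rest (count + 1) (l :: acc)
    else pvGoA N rest count (l :: acc)

def query_last_ticks (log_lines : List String) (N : Int) : String :=
  PySem.Str.join "\n" (pvGoA N log_lines.reverse 0 [])

-- ===== PORT B =====
def query_last_ticks_alt (log_lines : List String) (N : Int) : String :=
  let tick_indices : List Int :=
    ((PySem.List.enumerate log_lines 0).filter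
      (fun p => PySem.Str.startswith p.2 "--- Tick")).map (fun p => p.1)
  let m : Int := tick_indices.length
  let k : Int := max N 0
  -- tick_indices[m - 1 - k]: the index is in range whenever m > k (proved below), so pyGetD is exact
  let start : Int :=
    if m > k then PySem.List.pyGetD tick_indices (m - 1 - k) 0 + 1 else 0
  PySem.Str.join "\n" (PySem.List.slice log_lines (some start) none)

-- ===== PRECONDITION & SPEC =====
def Spec_query_last_ticks (log_lines : List String) (N : Int) (out : String) : Prop := out = query_last_ticks_alt log_lines N
instance (log_lines : List String) (N : Int) (out : String) : Decidable (Spec_query_last_ticks log_lines N out) := by unfold Spec_query_last_ticks; infer_instance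

-- ===== CLAIM (what is proved, stated in full; the proofs are below) =====
def Claim_equal_query_last_ticks : Prop := ∀ (log_lines : List String) (N : Int), Dom_query_last_ticks log_lines N → Spec_query_last_ticks log_lines N (query_last_ticks log_lines N)

-- ===== LEMMAS AND PROOFS =====

-- what A's loop keeps, read off the reversed list with a Nat allowance of ticks
def pvKeep : Nat → List String → List String
  | _, [] => []
  | k, l :: rest =>
    if pvTick l then (if k = 0 then [] else l :: pvKeep (k - 1) rest)
    else l :: pvKeep k rest

-- the common spec: the suffix of xs strictly after the (k+1)-th tick from the back
def pvS (k : Nat) : List String → List String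
  | [] => []
  | x :: xs => if (x :: xs).countP pvTick ≤ k then x :: xs else pvS k xs

-- the tick-index list with starting offset s
def pvIdx (s : Int) (xs : List String) : List Int :=
  ((PySem.List.enumerate xs s).filter (fun p => pvTick p.2)).map (fun p => p.1)

lemma pvGoA_eq (N : Int) : ∀ (ys : List String) (c : Int) (acc : List String),
    pvGoA N ys c acc = (pvKeep (N - c).toNat ys).reverse ++ acc := by
  intro ys
  induction ys with
  | nil => intro c acc; simp [pvGoA, pvKeep]
  | cons l rest ih =>
    intro c acc
    by_cases ht : pvTick l
    · by_cases hb : c + 1 > N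
      · have h0 : (N - c).toNat = 0 := by omega
        simp [pvGoA, pvKeep, ht, hb, h0]
      · have h0 : (N - c).toNat ≠ 0 := by omega
        have h1 : (N - c).toNat - 1 = (N - (c + 1)).toNat := by omega
        simp [pvGoA, pvKeep, ht, hb, h0, h1, ih]
    · simp [pvGoA, pvKeep, ht, ih]

lemma pvKeep_append : ∀ (ys zs : List String) (k : Nat),
    pvKeep k (ys ++ zs) =
      if ys.countP pvTick ≤ k then ys ++ pvKeep (k - ys.countP pvTick) zs else pvKeep k ys := by
  intro ys
  induction ys with
  | nil => intro zs k; simp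
  | cons l rest ih =>
    intro zs k
    by_cases ht : pvTick l
    · by_cases hk : k = 0
      · subst hk
        simp [pvKeep, ht]
      · have hcnt : (l :: rest).countP pvTick = rest.countP pvTick + 1 := by
          simp [List.countP_cons, ht]
        by_cases hle : rest.countP pvTick + 1 ≤ k
        · have hle' : rest.countP pvTick ≤ k - 1 := by omega
          simp [pvKeep, ht, hk, hcnt, hle, ih, hle']
          congr 1
          omega
        · have hle' : ¬ rest.countP pvTick ≤ k - 1 := by omega
          simp [pvKeep, ht, hk, hcnt, hle, ih, hle']
    · have hcnt : (l :: rest).countP pvTick = rest.countP pvTick := by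
        simp [List.countP_cons, ht]
      simp [pvKeep, ht, hcnt, ih]
      split <;> simp

lemma pvS_all {xs : List String} {k : Nat} (h : xs.countP pvTick ≤ k) :
    pvS k xs = xs := by
  cases xs with
  | nil => simp [pvS]
  | cons x xs => simp [pvS, h]

lemma pvA_S : ∀ (xs : List String) (k : Nat),
    (pvKeep k xs.reverse).reverse = pvS k xs := by
  intro xs
  induction xs with
  | nil => intro k; simp [pvKeep, pvS]
  | cons x xs ih =>
    intro k
    have hrev : (x :: xs).reverse = xs.reverse ++ [x] := by simp
    have hcrev : xs.reverse.countP pvTick = xs.countP pvTick := by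
      simp [List.countP_reverse]
    rw [hrev, pvKeep_append, hcrev]
    by_cases hle : xs.countP pvTick ≤ k
    · by_cases ht : pvTick x
      · by_cases hk : k - xs.countP pvTick = 0
        · have hgt : ¬ (x :: xs).countP pvTick ≤ k := by
            simp [List.countP_cons, ht]; omega
          have h1 : pvKeep (k - xs.countP pvTick) [x] = [] := by
            simp [pvKeep, ht, hk]
          have hS : pvS k (x :: xs) = pvS k xs := by
            simp only [pvS, if_neg hgt]
          rw [if_pos hle, h1, List.append_nil, hS, pvS_all hle]
          simp
        · have h1 : pvKeep (k - xs.countP pvTick) [x] = [x] := by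
            simp [pvKeep, ht, hk]
          have hlek : (x :: xs).countP pvTick ≤ k := by
            simp [List.countP_cons, ht]; omega
          rw [if_pos hle, h1, pvS_all hlek]
          simp
      · have h1 : pvKeep (k - xs.countP pvTick) [x] = [x] := by
          simp [pvKeep, ht]
        have hlek : (x :: xs).countP pvTick ≤ k := by
          simpa [List.countP_cons, ht] using hle
        rw [if_pos hle, h1, pvS_all hlek]
        simp
    · have hgt : ¬ (x :: xs).countP pvTick ≤ k := by
        by_cases ht : pvTick x <;> simp [List.countP_cons, ht] <;> omega
      have hS : pvS k (x :: xs) = pvS k xs := by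
        simp only [pvS, if_neg hgt]
      rw [if_neg hle, hS]
      exact ih k

lemma pvIdx_cons (s : Int) (x : String) (xs : List String) :
    pvIdx s (x :: xs) = if pvTick x then s :: pvIdx (s + 1) xs else pvIdx (s + 1) xs := by
  by_cases ht : pvTick x <;> simp [pvIdx, PySem.List.enumerate_cons, ht]

lemma pvIdx_shift : ∀ (xs : List String) (s : Int),
    pvIdx s xs = (pvIdx 0 xs).map (fun i => i + s) := by
  intro xs
  induction xs with
  | nil => intro s; simp [pvIdx]
  | cons x xs ih =>
    intro s
    rw [pvIdx_cons, pvIdx_cons, ih (s + 1), ih (0 + 1)]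
    have hmm : ∀ L : List Int, (L.map (fun i => i + (0 + 1))).map (fun i => i + s)
        = L.map (fun i => i + (s + 1)) := by
      intro L
      rw [List.map_map]
      apply List.map_congr_left
      intro i _
      simp
      ring
    by_cases ht : pvTick x <;> simp [ht, hmm] <;>
      exact fun a _ => by ring

lemma pvIdx_length : ∀ (xs : List String) (s : Int),
    (pvIdx s xs).length = xs.countP pvTick := by
  intro xs
  induction xs with
  | nil => intro s; simp [pvIdx]
  | cons x xs ih =>
    intro s
    rw [pvIdx_cons]
    by_cases ht : pvTick x <;> simp [ht, ih, List.countP_cons]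

lemma pvIdx_nonneg : ∀ (xs : List String) (i : Int), i ∈ pvIdx 0 xs → 0 ≤ i := by
  intro xs
  induction xs with
  | nil => intro i h; simp [pvIdx] at h
  | cons x xs ih =>
    intro i h
    rw [pvIdx_cons, pvIdx_shift xs (0 + 1)] at h
    by_cases ht : pvTick x
    · simp [ht] at h
      rcases h with h | ⟨j, hj, rfl⟩
      · omega
      · have := ih j hj; omega
    · simp [ht] at h
      rcases h with ⟨j, hj, rfl⟩
      have := ih j hj; omega

lemma pvGetD_idx_cons (x : String) (xs : List String) (k : Nat)
    (hkt : k < xs.countP pvTick) :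
    PySem.List.pyGetD (pvIdx 0 (x :: xs)) (((pvIdx 0 (x :: xs)).length : Int) - 1 - k) 0
      = PySem.List.pyGetD (pvIdx 0 xs) (((pvIdx 0 xs).length : Int) - 1 - k) 0 + 1 := by
  have hlenx := pvIdx_length xs 0
  have hjt : xs.countP pvTick - 1 - k < xs.countP pvTick := by omega
  have hjlen : xs.countP pvTick - 1 - k < (pvIdx 0 xs).length := by omega
  have hR : (((pvIdx 0 xs).length : Int) - 1 - k) = ((xs.countP pvTick - 1 - k : Nat) : Int) := by
    omega
  rw [hR, PySem.List.pyGetD_natCast, List.getD_eq_getElem _ _ hjlen]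
  rw [pvIdx_cons, pvIdx_shift xs (0 + 1)]
  by_cases ht : pvTick x
  · rw [if_pos ht]
    have hlen1 : ((0 : Int) :: (pvIdx 0 xs).map (fun i => i + (0 + 1))).length
        = xs.countP pvTick + 1 := by simp [hlenx]
    have hL : (((0 : Int) :: (pvIdx 0 xs).map (fun i => i + (0 + 1))).length : Int) - 1 - k
        = (((xs.countP pvTick - 1 - k) + 1 : Nat) : Int) := by
      omega
    rw [hL, PySem.List.pyGetD_natCast, List.getD_cons_succ,
      List.getD_eq_getElem _ _ (by simpa [hlenx] using hjlen), List.getElem_map]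
    omega
  · rw [if_neg ht]
    have hlen1 : (((pvIdx 0 xs).map (fun i => i + (0 + 1))).length : Int) - 1 - k
        = ((xs.countP pvTick - 1 - k : Nat) : Int) := by
      have hlenm : ((pvIdx 0 xs).map (fun i => i + (0 + 1))).length = xs.countP pvTick := by
        simp [hlenx]
      omega
    rw [hlen1, PySem.List.pyGetD_natCast,
      List.getD_eq_getElem _ _ (by simpa [hlenx] using hjlen), List.getElem_map]
    omega

-- B's list result equals pvS
lemma pvB_S : ∀ (xs : List String) (k : Nat),
    PySem.List.slice xs
      (some (if ((pvIdx 0 xs).length : Int) > (k : Int)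
             then PySem.List.pyGetD (pvIdx 0 xs) (((pvIdx 0 xs).length : Int) - 1 - (k : Int)) 0 + 1
             else 0)) none
      = pvS k xs := by
  intro xs
  induction xs with
  | nil =>
    intro k
    have h : ¬ (((pvIdx 0 ([] : List String)).length : Int) > (k : Int)) := by
      simp [pvIdx]
    rw [if_neg h, PySem.List.slice_from _ (by omega)]
    simp [pvS]
  | cons x xs ih =>
    intro k
    have hlen : (pvIdx 0 (x :: xs)).length = (x :: xs).countP pvTick := pvIdx_length _ 0
    have hlenx : (pvIdx 0 xs).length = xs.countP pvTick := pvIdx_length _ 0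
    by_cases hm : ((pvIdx 0 (x :: xs)).length : Int) > (k : Int)
    · have hck : k < (x :: xs).countP pvTick := by
        rw [hlen] at hm; exact_mod_cast hm
      have hgt : ¬ (x :: xs).countP pvTick ≤ k := by omega
      have hS : pvS k (x :: xs) = pvS k xs := by
        simp only [pvS, if_neg hgt]
      by_cases ht : pvTick x
      · have hcx : (x :: xs).countP pvTick = xs.countP pvTick + 1 := by
          simp [List.countP_cons, ht]
        by_cases htk : xs.countP pvTick = k
        · -- the new tick is the cut: start = 1
          have hj : ((pvIdx 0 (x :: xs)).length : Int) - 1 - (k : Int) = 0 := by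
            omega
          have hval : PySem.List.pyGetD (pvIdx 0 (x :: xs)) 0 0 = 0 := by
            rw [pvIdx_cons, if_pos ht]
            simp [PySem.List.pyGetD_zero_cons]
          rw [if_pos hm, hj, hval, PySem.List.slice_from _ (by omega)]
          rw [hS, pvS_all (show xs.countP pvTick ≤ k by omega)]
          simp
        · have hkt : k < xs.countP pvTick := by omega
          have key := pvGetD_idx_cons x xs k hkt
          have hmx : ((pvIdx 0 xs).length : Int) > (k : Int) := by
            rw [hlenx]; exact_mod_cast hkt
          have ha : 0 ≤ PySem.List.pyGetD (pvIdx 0 xs) (((pvIdx 0 xs).length : Int) - 1 - (k : Int)) 0 := by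
            have hjlen : xs.countP pvTick - 1 - k < (pvIdx 0 xs).length := by omega
            have hR : (((pvIdx 0 xs).length : Int) - 1 - (k : Int))
                = ((xs.countP pvTick - 1 - k : Nat) : Int) := by
              omega
            rw [hR, PySem.List.pyGetD_natCast, List.getD_eq_getElem _ _ hjlen]
            exact pvIdx_nonneg xs _ (List.getElem_mem hjlen)
          have ihk := ih k
          rw [if_pos hmx, PySem.List.slice_from _ (by omega)] at ihk
          rw [if_pos hm, key, PySem.List.slice_from _ (by omega)]
          have hdrop : (PySem.List.pyGetD (pvIdx 0 xs) (((pvIdx 0 xs).length : Int) - 1 - (k : Int)) 0 + 1 + 1).toNat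
              = (PySem.List.pyGetD (pvIdx 0 xs) (((pvIdx 0 xs).length : Int) - 1 - (k : Int)) 0 + 1).toNat + 1 := by
            omega
          rw [hdrop, List.drop_succ_cons, hS, ← ihk]
      · have hcx : (x :: xs).countP pvTick = xs.countP pvTick := by
          simp [List.countP_cons, ht]
        have hkt : k < xs.countP pvTick := by omega
        have key := pvGetD_idx_cons x xs k hkt
        have hmx : ((pvIdx 0 xs).length : Int) > (k : Int) := by
          rw [hlenx]; exact_mod_cast hkt
        have ha : 0 ≤ PySem.List.pyGetD (pvIdx 0 xs) (((pvIdx 0 xs).length : Int) - 1 - (k : Int)) 0 := by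
          have hjlen : xs.countP pvTick - 1 - k < (pvIdx 0 xs).length := by omega
          have hR : (((pvIdx 0 xs).length : Int) - 1 - (k : Int))
              = ((xs.countP pvTick - 1 - k : Nat) : Int) := by
            omega
          rw [hR, PySem.List.pyGetD_natCast, List.getD_eq_getElem _ _ hjlen]
          exact pvIdx_nonneg xs _ (List.getElem_mem hjlen)
        have ihk := ih k
        rw [if_pos hmx, PySem.List.slice_from _ (by omega)] at ihk
        rw [if_pos hm, key, PySem.List.slice_from _ (by omega)]
        have hdrop : (PySem.List.pyGetD (pvIdx 0 xs) (((pvIdx 0 xs).length : Int) - 1 - (k : Int)) 0 + 1 + 1).toNat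
            = (PySem.List.pyGetD (pvIdx 0 xs) (((pvIdx 0 xs).length : Int) - 1 - (k : Int)) 0 + 1).toNat + 1 := by
          omega
        rw [hdrop, List.drop_succ_cons, hS, ← ihk]
    · have hc : (x :: xs).countP pvTick ≤ k := by
        rw [hlen] at hm; omega
      rw [if_neg hm, PySem.List.slice_from _ (by omega)]
      simp [pvS_all hc]

-- ===== VERDICT (by name: the statement is the Claim_ definition above) =====
theorem query_last_ticks_spec : Claim_equal_query_last_ticks := by
  intro log_lines N _hdom
  show query_last_ticks log_lines N = query_last_ticks_alt log_lines N
  have hA : pvGoA N log_lines.reverse 0 [] = pvS N.toNat log_lines := by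
    rw [pvGoA_eq]
    have h0 : (N - 0).toNat = N.toNat := by omega
    rw [h0]
    simpa using pvA_S log_lines N.toNat
  have hBdef : query_last_ticks_alt log_lines N =
      PySem.Str.join "\n" (PySem.List.slice log_lines
        (some (if ((pvIdx 0 log_lines).length : Int) > max N 0
               then PySem.List.pyGetD (pvIdx 0 log_lines)
                 (((pvIdx 0 log_lines).length : Int) - 1 - max N 0) 0 + 1
               else 0)) none) := rfl
  have hmax : max N 0 = ((N.toNat : Nat) : Int) := by omega
  rw [query_last_ticks, hA, hBdef, hmax, pvB_S log_lines N.toNat]
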